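-- pv_equiv track=rewrite | github.com/felipe-fp/JamesBot | python_package/jamesbot/stock.py | get_concerned
-- ===== SOURCE A (Python) =====
-- def get_concerned(periods):
--
--     first_concerned = None
--     flag = True
--     last_concerned = None
--     n_concerned = 0
--
--     for i in range(len(periods)):
--         if periods[i]['concerned']:
--             n_concerned += 1
--             if flag:
--                 flag = False
--                 first_concerned = i
--             last_concerned = i
--
--     return first_concerned, last_concerned, n_concerned
-- ===== SOURCE B (Python) =====
-- def get_concerned(periods):
--     count = sum(1 for p in periods if p['concerned'])
--     if count == 0:
--         return None, None, 0
--     first = 0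
--     while not periods[first]['concerned']:
--         first += 1
--     last = len(periods) - 1
--     while not periods[last]['concerned']:
--         last -= 1
--     return first, last, count
-- ===== Notes on version B (the rewrite author's own statement) =====
-- stated objective: alternative
-- what changed: Replaces A's single flag-tracking accumulator scan with three staged computations: a counting pass, then an early-exit forward scan from index 0 for the first concerned index and an early-exit backward scan from the end for the last.
import Mathlib
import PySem

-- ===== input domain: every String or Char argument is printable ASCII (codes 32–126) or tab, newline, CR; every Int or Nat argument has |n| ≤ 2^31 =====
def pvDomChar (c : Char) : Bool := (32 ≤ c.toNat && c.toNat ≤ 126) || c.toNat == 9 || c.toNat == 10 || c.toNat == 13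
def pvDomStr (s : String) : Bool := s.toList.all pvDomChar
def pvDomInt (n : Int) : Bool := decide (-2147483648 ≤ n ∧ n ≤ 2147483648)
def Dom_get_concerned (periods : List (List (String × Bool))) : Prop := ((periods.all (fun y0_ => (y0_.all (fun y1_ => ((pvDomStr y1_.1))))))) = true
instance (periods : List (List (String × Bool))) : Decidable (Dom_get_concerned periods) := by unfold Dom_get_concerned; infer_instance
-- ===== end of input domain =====

-- B replaces A's single flag-tracking scan with three staged computations: a counting pass, a forward early-exit scan for the first concerned index and a backward early-exit scan for the last (alternative decomposition; same O(n) cost).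


-- p['concerned'] as first-match lookup (the getD false default is only reached outside Pre_).
def pconc (p : List (String × Bool)) : Bool := (p.lookup "concerned").getD false

-- ===== PORT A =====
-- loop 'for i in range(len(periods))' with state (first_concerned, flag, last_concerned, n_concerned).
def get_concerned (periods : List (List (String × Bool))) : Option Int × Option Int × Int :=
  let st := (PySem.List.pyRange 0 periods.length 1).foldl
    (fun (st : Option Int × Bool × Option Int × Int) i =>
      if pconc (PySem.List.pyGetD periods i []) then
        if st.2.1 then (some i, false, some i, st.2.2.2 + 1)
        else (st.1, st.2.1, some i, st.2.2.2 + 1)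
      else st)
    (none, true, none, 0)
  (st.1, st.2.2.1, st.2.2.2)

-- ===== PORT B =====
-- count = sum(1 for p in periods if p['concerned'])
def bCount (periods : List (List (String × Bool))) : Int :=
  periods.foldl (fun acc p => if pconc p then acc + 1 else acc) 0

-- while not periods[first]['concerned']: first += 1   (the range guard is only a totality guard;
-- under count ≠ 0 a concerned index exists and the loop stops inside the list, as in Python)
def bFwd (periods : List (List (String × Bool))) (i : Nat) : Nat :=
  if _h : i < periods.length then
    if pconc (periods.getD i []) then i else bFwd periods (i + 1)
  else i
termination_by periods.length - i

-- while not periods[last]['concerned']: last -= 1   (the 0 case is only a totality guard, as above)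
def bBwd (periods : List (List (String × Bool))) (i : Nat) : Nat :=
  if pconc (periods.getD i []) then i
  else match i with
    | 0 => 0
    | j + 1 => bBwd periods j

def get_concerned_alt (periods : List (List (String × Bool))) : Option Int × Option Int × Int :=
  let count := bCount periods
  if count = 0 then (none, none, 0)
  else (some ((bFwd periods 0 : Nat) : Int),
        some ((bBwd periods (periods.length - 1) : Nat) : Int),
        count)

-- ===== PRECONDITION & SPEC =====
-- Pre_ excludes inputs where some period dict lacks the key "concerned": there Python A (and B) raises KeyError.
def Pre_get_concerned (periods : List (List (String × Bool))) : Prop :=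
  ∀ p ∈ periods, (p.lookup "concerned").isSome = true
instance (periods : List (List (String × Bool))) : Decidable (Pre_get_concerned periods) := by unfold Pre_get_concerned; infer_instance
def pvWitness_get_concerned : (List (List (String × Bool))) := [[("concerned", true)], [("concerned", false)]]

def Spec_get_concerned (periods : List (List (String × Bool))) (out : Option Int × Option Int × Int) : Prop := out = get_concerned_alt periods
instance (periods : List (List (String × Bool))) (out : Option Int × Option Int × Int) : Decidable (Spec_get_concerned periods out) := by unfold Spec_get_concerned; infer_instance

-- ===== CLAIM (what is proved, stated in full; the proofs are below) =====
def Claim_equal_get_concerned : Prop := ∀ (periods : List (List (String × Bool))), Dom_get_concerned periods → Pre_get_concerned periods → Spec_get_concerned periods (get_concerned periods)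

-- ===== LEMMAS AND PROOFS =====

-- the concerned-index list both sides are characterized by
def cIdx (periods : List (List (String × Bool))) : List Int :=
  (PySem.List.enumerate periods 0).filterMap (fun pr => if pconc pr.2 then some pr.1 else none)

-- A's index loop over range(len(xs)) folds the same function as a fold over enumerate of the tail.
theorem foldl_pyRange_enumerate {α σ : Type} (xs : List α) (d : α) (f : σ → Int → α → σ) :
    ∀ (n k : Nat), xs.length - k = n → ∀ (init : σ),
      (PySem.List.pyRange (k : Int) (xs.length : Int) 1).foldl
          (fun st i => f st i (PySem.List.pyGetD xs i d)) init
        = (PySem.List.enumerate (xs.drop k) (k : Int)).foldl (fun st p => f st p.1 p.2) init := by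
  intro n
  induction n with
  | zero =>
    intro k hk init
    have hle : xs.length ≤ k := by omega
    rw [PySem.List.pyRange_one_eq_nil (by exact_mod_cast hle), List.drop_eq_nil_of_le hle]
    simp [PySem.List.enumerate]
  | succ m ih =>
    intro k hk init
    have hlt : k < xs.length := by omega
    rw [PySem.List.pyRange_one_cons (by exact_mod_cast hlt), List.drop_eq_getElem_cons hlt,
        PySem.List.enumerate_cons]
    simp only [List.foldl_cons]
    have hGet : PySem.List.pyGetD xs (k : Int) d = xs[k] := by
      rw [PySem.List.pyGetD_eq_getElem xs d (by positivity) (by exact_mod_cast hlt)]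
      simp
    rw [hGet]
    have : ((k : Int) + 1) = ((k + 1 : Nat) : Int) := by push_cast; ring
    rw [this, ih (k + 1) (by omega)]

-- folding A's step equals reading first/flag/last/count off the filtered index list
theorem foldl_step_eq_pack :
    ∀ (l : List (Int × List (String × Bool))),
      l.foldl
        (fun (st : Option Int × Bool × Option Int × Int) p =>
          if pconc p.2 then
            if st.2.1 then (some p.1, false, some p.1, st.2.2.2 + 1)
            else (st.1, st.2.1, some p.1, st.2.2.2 + 1)
          else st)
        (none, true, none, 0)
      = (let idx := l.filterMap (fun pr => if pconc pr.2 then some pr.1 else none)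
         (idx.head?, idx.isEmpty, idx.getLast?, (idx.length : Int))) := by
  intro l
  induction l using List.reverseRecOn with
  | nil => simp
  | append_singleton l x ih =>
    rw [List.foldl_append, ih]
    simp only [List.filterMap_append, List.filterMap_cons, List.filterMap_nil]
    by_cases hp : pconc x.2
    · simp only [hp, if_true]
      cases hidx : l.filterMap (fun pr => if pconc pr.2 then some pr.1 else none) with
      | nil => simp [hp]
      | cons a t =>
        simp only [List.foldl_cons, List.foldl_nil, hp, if_true, List.isEmpty_cons,
          Bool.false_eq_true, if_false, List.getLast?_concat,
          List.head?_cons, List.length_append, List.length_cons, List.length_nil]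
        simp only [Prod.mk.injEq]
        refine ⟨by simp, by simp, trivial, by push_cast; ring⟩
    · simp [hp]

theorem A_eq_pack (periods : List (List (String × Bool))) :
    get_concerned periods
      = ((cIdx periods).head?, (cIdx periods).getLast?, ((cIdx periods).length : Int)) := by
  unfold get_concerned cIdx
  have h1 := foldl_pyRange_enumerate periods ([] : List (String × Bool))
    (fun st i v =>
      if pconc v then
        if st.2.1 then (some i, false, some i, st.2.2.2 + 1)
        else (st.1, st.2.1, some i, st.2.2.2 + 1)
      else st)
    periods.length 0 rfl ((none, true, none, 0) : Option Int × Bool × Option Int × Int)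
  have h2 := foldl_step_eq_pack (PySem.List.enumerate periods ((0 : Nat) : Int))
  simp only [List.drop_zero] at h1
  simp only [Nat.cast_zero] at h1 h2 ⊢
  simp only [h1, h2]

-- B's counting pass counts the same indices
theorem bCount_eq (periods : List (List (String × Bool))) :
    bCount periods = ((cIdx periods).length : Int) := by
  unfold bCount cIdx
  have gen : ∀ (l : List (List (String × Bool))) (s : Int) (acc : Int),
      l.foldl (fun acc p => if pconc p then acc + 1 else acc) acc
        = acc + (((PySem.List.enumerate l s).filterMap
            (fun pr => if pconc pr.2 then some pr.1 else none)).length : Int) := by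
    intro l
    induction l with
    | nil => intro s acc; simp [PySem.List.enumerate]
    | cons x t ih =>
      intro s acc
      rw [PySem.List.enumerate_cons]
      by_cases hp : pconc x
      · simp only [List.foldl_cons, List.filterMap_cons, hp, if_true, List.length_cons,
          ih (s + 1)]
        push_cast; ring
      · simp only [List.foldl_cons, List.filterMap_cons, hp, Bool.false_eq_true, if_false,
          ih (s + 1)]
  have := gen periods 0 0
  simpa using this

-- the forward scan finds the head of the concerned-index list of the remaining suffix
theorem bFwd_spec (periods : List (List (String × Bool))) :
    ∀ (n i : Nat), periods.length - i = n →
      ((PySem.List.enumerate (periods.drop i) (i : Int)).filterMap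
          (fun pr => if pconc pr.2 then some pr.1 else none)) ≠ [] →
      ((PySem.List.enumerate (periods.drop i) (i : Int)).filterMap
          (fun pr => if pconc pr.2 then some pr.1 else none)).head?
        = some ((bFwd periods i : Nat) : Int) := by
  intro n
  induction n with
  | zero =>
    intro i hk hne
    have hle : periods.length ≤ i := by omega
    rw [List.drop_eq_nil_of_le hle] at hne
    simp [PySem.List.enumerate] at hne
  | succ m ih =>
    intro i hk hne
    have hlt : i < periods.length := by omega
    rw [List.drop_eq_getElem_cons hlt, PySem.List.enumerate_cons] at hne ⊢
    rw [bFwd]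
    simp only [hlt, dif_pos]
    have hget : periods.getD i [] = periods[i] := List.getD_eq_getElem periods [] hlt
    by_cases hp : pconc periods[i]
    · simp only [hget, hp, if_true, List.filterMap_cons, List.head?_cons]
    · simp only [List.filterMap_cons, hget, hp, Bool.false_eq_true, if_false] at hne ⊢
      have : ((i : Int) + 1) = ((i + 1 : Nat) : Int) := by push_cast; ring
      rw [this] at hne ⊢
      exact ih (i + 1) (by omega) hne

-- the backward scan finds the last element of the concerned-index list of the scanned prefix
theorem bBwd_spec (periods : List (List (String × Bool))) :
    ∀ (i : Nat), i < periods.length →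
      ((PySem.List.enumerate (periods.take (i + 1)) 0).filterMap
          (fun pr => if pconc pr.2 then some pr.1 else none)) ≠ [] →
      ((PySem.List.enumerate (periods.take (i + 1)) 0).filterMap
          (fun pr => if pconc pr.2 then some pr.1 else none)).getLast?
        = some ((bBwd periods i : Nat) : Int) := by
  intro i
  induction i with
  | zero =>
    intro h0 hne
    have htake : periods.take 1 = [periods[0]] := by
      cases periods with
      | nil => simp at h0
      | cons a t => simp
    rw [htake, PySem.List.enumerate_cons] at hne ⊢
    simp only [PySem.List.enumerate_nil, List.filterMap_cons, List.filterMap_nil] at hne ⊢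
    have hget : periods.getD 0 [] = periods[0] := List.getD_eq_getElem periods [] h0
    by_cases hp : pconc periods[0]
    · rw [bBwd]; simp [hp]
    · simp [hp] at hne
  | succ j ih =>
    intro hlt hne
    have hjlt : j < periods.length := by omega
    have htake : periods.take (j + 1 + 1) = periods.take (j + 1) ++ [periods[j + 1]] := by
      rw [List.take_add_one]
      simp [List.getElem?_eq_getElem hlt]
    have hlen : (periods.take (j + 1)).length = j + 1 := by
      rw [List.length_take]; omega
    rw [htake, PySem.List.enumerate_append, hlen, List.filterMap_append] at hne ⊢
    rw [PySem.List.enumerate_cons] at hne ⊢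
    simp only [PySem.List.enumerate_nil, List.filterMap_cons, List.filterMap_nil] at hne ⊢
    have hget : periods.getD (j + 1) [] = periods[j + 1] :=
      List.getD_eq_getElem periods [] hlt
    by_cases hp : pconc periods[j + 1]
    · rw [bBwd]
      simp only [hget, hp, if_true]
      simp
    · rw [bBwd]
      simp only [hget, hp, Bool.false_eq_true, if_false] at hne ⊢
      simp only [List.append_nil] at hne ⊢
      exact ih hjlt hne

theorem get_concerned_eq (periods : List (List (String × Bool))) :
    get_concerned periods = get_concerned_alt periods := by
  rw [A_eq_pack]
  simp only [get_concerned_alt, bCount_eq]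
  by_cases hemp : cIdx periods = []
  · rw [hemp]; simp
  · have hlenne : ((cIdx periods).length : Int) ≠ 0 := by
      intro h
      exact hemp (List.length_eq_zero_iff.mp (by exact_mod_cast h))
    rw [if_neg hlenne]
    have hlen : 0 < periods.length := by
      by_contra hcon
      apply hemp
      have h0 : periods = [] := by
        cases periods with
        | nil => rfl
        | cons a t => simp at hcon
      unfold cIdx
      rw [h0]
      simp [PySem.List.enumerate]
    have hfwd : (cIdx periods).head? = some ((bFwd periods 0 : Nat) : Int) := by
      have h := bFwd_spec periods periods.length 0 rfl (by
        simp only [List.drop_zero, Nat.cast_zero]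
        unfold cIdx at hemp; exact hemp)
      simp only [List.drop_zero, Nat.cast_zero] at h
      unfold cIdx
      exact h
    have hbwd : (cIdx periods).getLast?
        = some ((bBwd periods (periods.length - 1) : Nat) : Int) := by
      have h := bBwd_spec periods (periods.length - 1) (by omega) (by
        rw [Nat.sub_add_cancel hlen, List.take_length]
        unfold cIdx at hemp; exact hemp)
      rw [Nat.sub_add_cancel hlen, List.take_length] at h
      unfold cIdx
      exact h
    rw [hfwd, hbwd]

-- ===== VERDICT (by name: the statement is the Claim_ definition above) =====
theorem get_concerned_spec : Claim_equal_get_concerned := by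
  intro periods _ _
  unfold Spec_get_concerned
  exact get_concerned_eq periods
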